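-- pv_equiv track=rewrite | github.com/matesdiquartiere/Bluetooth-Connection | bleak_bluetooth_signal.py | is_likely_apple_device
-- ===== SOURCE A (Python) =====
-- def is_likely_apple_device(address):
--     """
--     Check if a device is likely an Apple device based on its MAC address.
--
--     Args:
--         address: MAC address of the device
--
--     Returns:
--         bool: True if the device is likely an Apple device
--     """
--     # Common Apple MAC address prefixes
--     apple_prefixes = [
--         "AC:", "00:C6:", "00:CD:", "88:66:", "98:01:", "7C:9A:",
--         "28:CF:", "54:33:", "C8:2A:", "60:C5:", "68:96:", "24:A0:",
--         "F4:31:", "F0:D1:", "F0:F6:", "F8:1E:", "F8:62:", "FC:E9:",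
--         "10:40:", "10:93:", "14:10:", "14:20:", "18:34:", "18:65:",
--         "18:F6:", "1C:36:", "1C:91:", "20:78:", "24:F0:", "28:37:",
--         "28:6A:", "28:E0:", "28:E7:", "34:08:", "34:12:", "34:15:",
--         "34:AB:", "38:0F:", "38:48:", "3C:07:", "3C:D0:", "40:30:",
--         "40:4D:", "40:9C:", "40:A6:", "40:D3:", "44:00:", "44:2A:",
--         "44:D1:", "48:3B:", "48:43:", "48:74:", "4C:32:", "4C:57:",
--         "4C:74:", "4C:B1:", "50:32:", "50:EA:", "54:26:", "54:4E:",
--         "54:99:", "58:40:", "58:55:", "58:7F:", "5C:59:", "5C:95:",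
--         "5C:96:", "5C:97:", "5C:F5:", "5C:F7:", "5C:F8:", "60:33:",
--         "60:69:", "60:8C:", "60:92:", "60:9A:", "60:A3:", "60:C5:",
--         "60:F4:", "60:FA:", "60:FB:", "64:20:", "64:76:", "64:9A:",
--         "64:A3:", "64:B0:", "64:B9:", "64:E6:", "68:09:", "68:64:",
--         "68:96:", "68:9C:", "68:A8:", "68:AB:", "68:AE:", "68:D9:",
--         "68:FB:", "6C:19:", "6C:3E:", "6C:70:", "6C:72:", "6C:8D:",
--         "6C:94:", "6C:96:", "6C:AB:", "70:14:", "70:3E:", "70:48:",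
--         "70:56:", "70:73:", "70:A2:", "70:CD:", "70:DE:", "70:E7:",
--         "70:EC:", "74:1B:", "74:81:", "74:8D:", "74:E1:", "74:E2:",
--         "78:31:", "78:32:", "78:6C:", "78:7B:", "78:88:", "78:9F:",
--         "78:A3:", "78:CA:", "7C:01:", "7C:04:", "7C:11:", "7C:50:",
--         "7C:6D:", "7C:FA:", "80:00:", "80:49:", "80:82:", "80:92:",
--         "80:B0:", "80:E6:", "84:29:", "84:38:", "84:41:", "84:78:",
--         "84:85:", "84:89:", "84:A1:", "84:B1:", "84:FC:", "88:19:",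
--         "88:1F:", "88:53:", "88:66:", "88:C6:", "8C:00:", "8C:29:",
--         "8C:2D:", "8C:7B:", "8C:8E:", "8C:FA:", "90:27:", "90:60:",
--         "90:72:", "90:84:", "90:8D:", "90:B0:", "90:B2:", "90:C1:",
--         "90:FD:", "94:94:", "94:BF:", "94:E9:", "94:F6:", "98:00:",
--         "98:01:", "98:03:", "98:10:", "98:5A:", "98:9E:", "98:B8:",
--         "98:D6:", "98:E0:", "98:F0:", "98:F4:", "98:FE:", "9C:04:",
--         "9C:20:", "9C:29:", "9C:35:", "9C:4F:", "9C:8B:", "9C:F3:",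
--         "9C:F4:", "A0:99:", "A0:D7:", "A4:31:", "A4:67:", "A4:B1:",
--         "A4:B8:", "A4:C3:", "A4:D1:", "A4:D9:", "A8:20:", "A8:5B:",
--         "A8:5C:", "A8:66:", "A8:88:", "A8:8E:", "A8:96:", "A8:BB:",
--         "A8:FA:", "AC:1F:", "AC:29:", "AC:3C:", "AC:61:", "AC:7F:",
--         "AC:87:", "AC:BC:", "AC:CF:", "AC:E4:", "AC:FD:", "B0:19:",
--         "B0:34:", "B0:48:", "B0:65:", "B0:70:", "B0:9F:", "B0:CA:",
--         "B0:EC:", "B4:18:", "B4:4B:", "B4:8B:", "B4:F0:", "B8:09:",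
--         "B8:17:", "B8:41:", "B8:44:", "B8:53:", "B8:63:", "B8:78:",
--         "B8:8D:", "B8:C1:", "B8:C7:", "B8:E8:", "B8:F6:", "B8:FF:",
--         "BC:3B:", "BC:4C:", "BC:52:", "BC:54:", "BC:67:", "BC:92:",
--         "BC:9F:", "BC:A9:", "BC:EC:", "C0:1A:", "C0:63:", "C0:84:",
--         "C0:A5:", "C0:CC:", "C0:CE:", "C0:D0:", "C0:F2:", "C4:2C:",
--         "C4:98:", "C4:B3:", "C8:1E:", "C8:2A:", "C8:33:", "C8:3C:",
--         "C8:69:", "C8:85:", "C8:B5:", "C8:BC:", "C8:BF:", "C8:D0:",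
--         "C8:E0:", "C8:F6:", "CC:08:", "CC:20:", "CC:25:", "CC:29:",
--         "CC:44:", "CC:78:", "CC:7E:", "CC:C7:", "D0:03:", "D0:23:",
--         "D0:25:", "D0:33:", "D0:4B:", "D0:81:", "D0:A6:", "D0:C5:",
--         "D0:D2:", "D0:E1:", "D4:61:", "D4:9A:", "D4:A3:", "D4:DC:",
--         "D4:F4:", "D8:00:", "D8:1D:", "D8:30:", "D8:8F:", "D8:96:",
--         "D8:9E:", "D8:BB:", "D8:CF:", "D8:D1:", "DC:0C:", "DC:2B:",
--         "DC:37:", "DC:41:", "DC:86:", "DC:A4:", "DC:A9:", "DC:D2:",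
--         "DC:F7:", "E0:5F:", "E0:66:", "E0:B5:", "E0:B9:", "E0:C7:",
--         "E0:F5:", "E0:F8:", "E4:25:", "E4:2B:", "E4:8B:", "E4:9A:",
--         "E4:C6:", "E4:CE:", "E4:E0:", "E4:E4:", "E8:04:", "E8:06:",
--         "E8:80:", "E8:8D:", "E8:B2:", "EC:35:", "EC:85:", "EC:AD:",
--         "F0:18:", "F0:79:", "F0:98:", "F0:99:", "F0:B0:", "F0:B1:",
--         "F0:C1:", "F0:CB:", "F0:D1:", "F0:DB:", "F0:DC:", "F0:F6:",
--         "F4:0F:", "F4:1B:", "F4:31:", "F4:37:", "F4:5C:", "F4:D4:",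
--         "F4:F1:", "F4:F5:", "F8:03:", "F8:1E:", "F8:27:", "F8:38:",
--         "F8:62:", "F8:6F:", "FC:25:", "FC:A8:", "FC:B6:", "FC:D8:",
--         "FC:E9:", "FC:FC:"
--     ]
--
--     for prefix in apple_prefixes:
--         if address.upper().startswith(prefix):
--             return True
--
--     return False
-- ===== SOURCE B (Python) =====
-- # Alternative re-implementation: instead of scanning 374 string prefixes with
-- # startswith, decode the first one or two MAC bytes of the uppercased address
-- # arithmetically (via ord()) and test the resulting integer against a prebuilt
-- # set of numeric prefix codes.
--
-- _APPLE_LONG_CODES = {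
--     0x00C6, 0x00CD, 0x8866, 0x9801, 0x7C9A, 0x28CF, 0x5433, 0xC82A, 0x60C5,
--     0x6896, 0x24A0, 0xF431, 0xF0D1, 0xF0F6, 0xF81E, 0xF862, 0xFCE9, 0x1040,
--     0x1093, 0x1410, 0x1420, 0x1834, 0x1865, 0x18F6, 0x1C36, 0x1C91, 0x2078,
--     0x24F0, 0x2837, 0x286A, 0x28E0, 0x28E7, 0x3408, 0x3412, 0x3415, 0x34AB,
--     0x380F, 0x3848, 0x3C07, 0x3CD0, 0x4030, 0x404D, 0x409C, 0x40A6, 0x40D3,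
--     0x4400, 0x442A, 0x44D1, 0x483B, 0x4843, 0x4874, 0x4C32, 0x4C57, 0x4C74,
--     0x4CB1, 0x5032, 0x50EA, 0x5426, 0x544E, 0x5499, 0x5840, 0x5855, 0x587F,
--     0x5C59, 0x5C95, 0x5C96, 0x5C97, 0x5CF5, 0x5CF7, 0x5CF8, 0x6033, 0x6069,
--     0x608C, 0x6092, 0x609A, 0x60A3, 0x60C5, 0x60F4, 0x60FA, 0x60FB, 0x6420,
--     0x6476, 0x649A, 0x64A3, 0x64B0, 0x64B9, 0x64E6, 0x6809, 0x6864, 0x6896,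
--     0x689C, 0x68A8, 0x68AB, 0x68AE, 0x68D9, 0x68FB, 0x6C19, 0x6C3E, 0x6C70,
--     0x6C72, 0x6C8D, 0x6C94, 0x6C96, 0x6CAB, 0x7014, 0x703E, 0x7048, 0x7056,
--     0x7073, 0x70A2, 0x70CD, 0x70DE, 0x70E7, 0x70EC, 0x741B, 0x7481, 0x748D,
--     0x74E1, 0x74E2, 0x7831, 0x7832, 0x786C, 0x787B, 0x7888, 0x789F, 0x78A3,
--     0x78CA, 0x7C01, 0x7C04, 0x7C11, 0x7C50, 0x7C6D, 0x7CFA, 0x8000, 0x8049,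
--     0x8082, 0x8092, 0x80B0, 0x80E6, 0x8429, 0x8438, 0x8441, 0x8478, 0x8485,
--     0x8489, 0x84A1, 0x84B1, 0x84FC, 0x8819, 0x881F, 0x8853, 0x8866, 0x88C6,
--     0x8C00, 0x8C29, 0x8C2D, 0x8C7B, 0x8C8E, 0x8CFA, 0x9027, 0x9060, 0x9072,
--     0x9084, 0x908D, 0x90B0, 0x90B2, 0x90C1, 0x90FD, 0x9494, 0x94BF, 0x94E9,
--     0x94F6, 0x9800, 0x9801, 0x9803, 0x9810, 0x985A, 0x989E, 0x98B8, 0x98D6,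
--     0x98E0, 0x98F0, 0x98F4, 0x98FE, 0x9C04, 0x9C20, 0x9C29, 0x9C35, 0x9C4F,
--     0x9C8B, 0x9CF3, 0x9CF4, 0xA099, 0xA0D7, 0xA431, 0xA467, 0xA4B1, 0xA4B8,
--     0xA4C3, 0xA4D1, 0xA4D9, 0xA820, 0xA85B, 0xA85C, 0xA866, 0xA888, 0xA88E,
--     0xA896, 0xA8BB, 0xA8FA, 0xAC1F, 0xAC29, 0xAC3C, 0xAC61, 0xAC7F, 0xAC87,
--     0xACBC, 0xACCF, 0xACE4, 0xACFD, 0xB019, 0xB034, 0xB048, 0xB065, 0xB070,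
--     0xB09F, 0xB0CA, 0xB0EC, 0xB418, 0xB44B, 0xB48B, 0xB4F0, 0xB809, 0xB817,
--     0xB841, 0xB844, 0xB853, 0xB863, 0xB878, 0xB88D, 0xB8C1, 0xB8C7, 0xB8E8,
--     0xB8F6, 0xB8FF, 0xBC3B, 0xBC4C, 0xBC52, 0xBC54, 0xBC67, 0xBC92, 0xBC9F,
--     0xBCA9, 0xBCEC, 0xC01A, 0xC063, 0xC084, 0xC0A5, 0xC0CC, 0xC0CE, 0xC0D0,
--     0xC0F2, 0xC42C, 0xC498, 0xC4B3, 0xC81E, 0xC82A, 0xC833, 0xC83C, 0xC869,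
--     0xC885, 0xC8B5, 0xC8BC, 0xC8BF, 0xC8D0, 0xC8E0, 0xC8F6, 0xCC08, 0xCC20,
--     0xCC25, 0xCC29, 0xCC44, 0xCC78, 0xCC7E, 0xCCC7, 0xD003, 0xD023, 0xD025,
--     0xD033, 0xD04B, 0xD081, 0xD0A6, 0xD0C5, 0xD0D2, 0xD0E1, 0xD461, 0xD49A,
--     0xD4A3, 0xD4DC, 0xD4F4, 0xD800, 0xD81D, 0xD830, 0xD88F, 0xD896, 0xD89E,
--     0xD8BB, 0xD8CF, 0xD8D1, 0xDC0C, 0xDC2B, 0xDC37, 0xDC41, 0xDC86, 0xDCA4,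
--     0xDCA9, 0xDCD2, 0xDCF7, 0xE05F, 0xE066, 0xE0B5, 0xE0B9, 0xE0C7, 0xE0F5,
--     0xE0F8, 0xE425, 0xE42B, 0xE48B, 0xE49A, 0xE4C6, 0xE4CE, 0xE4E0, 0xE4E4,
--     0xE804, 0xE806, 0xE880, 0xE88D, 0xE8B2, 0xEC35, 0xEC85, 0xECAD, 0xF018,
--     0xF079, 0xF098, 0xF099, 0xF0B0, 0xF0B1, 0xF0C1, 0xF0CB, 0xF0D1, 0xF0DB,
--     0xF0DC, 0xF0F6, 0xF40F, 0xF41B, 0xF431, 0xF437, 0xF45C, 0xF4D4, 0xF4F1,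
--     0xF4F5, 0xF803, 0xF81E, 0xF827, 0xF838, 0xF862, 0xF86F, 0xFC25, 0xFCA8,
--     0xFCB6, 0xFCD8, 0xFCE9, 0xFCFC
-- }
--
--
-- def _hexval(c):
--     o = ord(c)
--     if 48 <= o <= 57:
--         return o - 48
--     if 65 <= o <= 70:
--         return o - 55
--     return -1
--
--
-- def is_likely_apple_device(address):
--     u = address.upper()
--     if len(u) < 3 or u[2] != ':':
--         return False
--     h0 = _hexval(u[0])
--     h1 = _hexval(u[1])
--     if h0 < 0 or h1 < 0:
--         return False
--     if h0 * 16 + h1 == 0xAC: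
--         return True
--     if len(u) < 6 or u[5] != ':':
--         return False
--     h3 = _hexval(u[3])
--     h4 = _hexval(u[4])
--     if h3 < 0 or h4 < 0:
--         return False
--     return (h0 * 16 + h1) * 256 + h3 * 16 + h4 in _APPLE_LONG_CODES
-- ===== Notes on version B (the rewrite author's own statement) =====
-- stated objective: alternative
-- what changed: Instead of scanning 374 string prefixes with startswith (recomputing address.upper() each iteration), B uppercases once, decodes the first one or two MAC bytes arithmetically from their hex characters, and tests the resulting integer against a prebuilt set of numeric prefix codes.
import Mathlib
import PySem

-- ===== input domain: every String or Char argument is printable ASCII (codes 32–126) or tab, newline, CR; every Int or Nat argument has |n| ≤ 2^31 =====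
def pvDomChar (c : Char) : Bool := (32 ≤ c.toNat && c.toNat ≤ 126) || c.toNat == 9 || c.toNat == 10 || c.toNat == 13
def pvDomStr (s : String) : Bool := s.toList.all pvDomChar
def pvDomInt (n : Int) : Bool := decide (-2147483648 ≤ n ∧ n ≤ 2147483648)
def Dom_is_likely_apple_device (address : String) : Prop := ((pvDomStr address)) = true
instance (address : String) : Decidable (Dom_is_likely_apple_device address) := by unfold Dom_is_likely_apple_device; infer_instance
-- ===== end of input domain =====

-- B replaces A's scan of 374 string prefixes with startswith by arithmetically
-- decoding the first one or two MAC bytes of the uppercased address and testing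
-- the resulting integer against a prebuilt set of numeric codes.

-- ===== PORT A =====
def apple_prefixes : List String := [
  "AC:", "00:C6:", "00:CD:", "88:66:", "98:01:", "7C:9A:", "28:CF:", "54:33:",
  "C8:2A:", "60:C5:", "68:96:", "24:A0:", "F4:31:", "F0:D1:", "F0:F6:",
  "F8:1E:", "F8:62:", "FC:E9:", "10:40:", "10:93:", "14:10:", "14:20:",
  "18:34:", "18:65:", "18:F6:", "1C:36:", "1C:91:", "20:78:", "24:F0:",
  "28:37:", "28:6A:", "28:E0:", "28:E7:", "34:08:", "34:12:", "34:15:",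
  "34:AB:", "38:0F:", "38:48:", "3C:07:", "3C:D0:", "40:30:", "40:4D:",
  "40:9C:", "40:A6:", "40:D3:", "44:00:", "44:2A:", "44:D1:", "48:3B:",
  "48:43:", "48:74:", "4C:32:", "4C:57:", "4C:74:", "4C:B1:", "50:32:",
  "50:EA:", "54:26:", "54:4E:", "54:99:", "58:40:", "58:55:", "58:7F:",
  "5C:59:", "5C:95:", "5C:96:", "5C:97:", "5C:F5:", "5C:F7:", "5C:F8:",
  "60:33:", "60:69:", "60:8C:", "60:92:", "60:9A:", "60:A3:", "60:C5:",
  "60:F4:", "60:FA:", "60:FB:", "64:20:", "64:76:", "64:9A:", "64:A3:",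
  "64:B0:", "64:B9:", "64:E6:", "68:09:", "68:64:", "68:96:", "68:9C:",
  "68:A8:", "68:AB:", "68:AE:", "68:D9:", "68:FB:", "6C:19:", "6C:3E:",
  "6C:70:", "6C:72:", "6C:8D:", "6C:94:", "6C:96:", "6C:AB:", "70:14:",
  "70:3E:", "70:48:", "70:56:", "70:73:", "70:A2:", "70:CD:", "70:DE:",
  "70:E7:", "70:EC:", "74:1B:", "74:81:", "74:8D:", "74:E1:", "74:E2:",
  "78:31:", "78:32:", "78:6C:", "78:7B:", "78:88:", "78:9F:", "78:A3:",
  "78:CA:", "7C:01:", "7C:04:", "7C:11:", "7C:50:", "7C:6D:", "7C:FA:",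
  "80:00:", "80:49:", "80:82:", "80:92:", "80:B0:", "80:E6:", "84:29:",
  "84:38:", "84:41:", "84:78:", "84:85:", "84:89:", "84:A1:", "84:B1:",
  "84:FC:", "88:19:", "88:1F:", "88:53:", "88:66:", "88:C6:", "8C:00:",
  "8C:29:", "8C:2D:", "8C:7B:", "8C:8E:", "8C:FA:", "90:27:", "90:60:",
  "90:72:", "90:84:", "90:8D:", "90:B0:", "90:B2:", "90:C1:", "90:FD:",
  "94:94:", "94:BF:", "94:E9:", "94:F6:", "98:00:", "98:01:", "98:03:",
  "98:10:", "98:5A:", "98:9E:", "98:B8:", "98:D6:", "98:E0:", "98:F0:",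
  "98:F4:", "98:FE:", "9C:04:", "9C:20:", "9C:29:", "9C:35:", "9C:4F:",
  "9C:8B:", "9C:F3:", "9C:F4:", "A0:99:", "A0:D7:", "A4:31:", "A4:67:",
  "A4:B1:", "A4:B8:", "A4:C3:", "A4:D1:", "A4:D9:", "A8:20:", "A8:5B:",
  "A8:5C:", "A8:66:", "A8:88:", "A8:8E:", "A8:96:", "A8:BB:", "A8:FA:",
  "AC:1F:", "AC:29:", "AC:3C:", "AC:61:", "AC:7F:", "AC:87:", "AC:BC:",
  "AC:CF:", "AC:E4:", "AC:FD:", "B0:19:", "B0:34:", "B0:48:", "B0:65:",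
  "B0:70:", "B0:9F:", "B0:CA:", "B0:EC:", "B4:18:", "B4:4B:", "B4:8B:",
  "B4:F0:", "B8:09:", "B8:17:", "B8:41:", "B8:44:", "B8:53:", "B8:63:",
  "B8:78:", "B8:8D:", "B8:C1:", "B8:C7:", "B8:E8:", "B8:F6:", "B8:FF:",
  "BC:3B:", "BC:4C:", "BC:52:", "BC:54:", "BC:67:", "BC:92:", "BC:9F:",
  "BC:A9:", "BC:EC:", "C0:1A:", "C0:63:", "C0:84:", "C0:A5:", "C0:CC:",
  "C0:CE:", "C0:D0:", "C0:F2:", "C4:2C:", "C4:98:", "C4:B3:", "C8:1E:",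
  "C8:2A:", "C8:33:", "C8:3C:", "C8:69:", "C8:85:", "C8:B5:", "C8:BC:",
  "C8:BF:", "C8:D0:", "C8:E0:", "C8:F6:", "CC:08:", "CC:20:", "CC:25:",
  "CC:29:", "CC:44:", "CC:78:", "CC:7E:", "CC:C7:", "D0:03:", "D0:23:",
  "D0:25:", "D0:33:", "D0:4B:", "D0:81:", "D0:A6:", "D0:C5:", "D0:D2:",
  "D0:E1:", "D4:61:", "D4:9A:", "D4:A3:", "D4:DC:", "D4:F4:", "D8:00:",
  "D8:1D:", "D8:30:", "D8:8F:", "D8:96:", "D8:9E:", "D8:BB:", "D8:CF:",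
  "D8:D1:", "DC:0C:", "DC:2B:", "DC:37:", "DC:41:", "DC:86:", "DC:A4:",
  "DC:A9:", "DC:D2:", "DC:F7:", "E0:5F:", "E0:66:", "E0:B5:", "E0:B9:",
  "E0:C7:", "E0:F5:", "E0:F8:", "E4:25:", "E4:2B:", "E4:8B:", "E4:9A:",
  "E4:C6:", "E4:CE:", "E4:E0:", "E4:E4:", "E8:04:", "E8:06:", "E8:80:",
  "E8:8D:", "E8:B2:", "EC:35:", "EC:85:", "EC:AD:", "F0:18:", "F0:79:",
  "F0:98:", "F0:99:", "F0:B0:", "F0:B1:", "F0:C1:", "F0:CB:", "F0:D1:",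
  "F0:DB:", "F0:DC:", "F0:F6:", "F4:0F:", "F4:1B:", "F4:31:", "F4:37:",
  "F4:5C:", "F4:D4:", "F4:F1:", "F4:F5:", "F8:03:", "F8:1E:", "F8:27:",
  "F8:38:", "F8:62:", "F8:6F:", "FC:25:", "FC:A8:", "FC:B6:", "FC:D8:",
  "FC:E9:", "FC:FC:" ]

-- for prefix in apple_prefixes: if address.upper().startswith(prefix): return True
-- return False   — the early-return loop is List.any over the same list
def is_likely_apple_device (address : String) : Bool :=
  apple_prefixes.any (fun pfx => PySem.Str.startswith (PySem.Str.upper address) pfx)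

-- ===== PORT B =====
-- the elements of Source B's _APPLE_LONG_CODES set literal, in order
def apple_long_codes_raw : List Int := [
  0x00C6, 0x00CD, 0x8866, 0x9801, 0x7C9A, 0x28CF, 0x5433, 0xC82A, 0x60C5,
  0x6896, 0x24A0, 0xF431, 0xF0D1, 0xF0F6, 0xF81E, 0xF862, 0xFCE9, 0x1040,
  0x1093, 0x1410, 0x1420, 0x1834, 0x1865, 0x18F6, 0x1C36, 0x1C91, 0x2078,
  0x24F0, 0x2837, 0x286A, 0x28E0, 0x28E7, 0x3408, 0x3412, 0x3415, 0x34AB,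
  0x380F, 0x3848, 0x3C07, 0x3CD0, 0x4030, 0x404D, 0x409C, 0x40A6, 0x40D3,
  0x4400, 0x442A, 0x44D1, 0x483B, 0x4843, 0x4874, 0x4C32, 0x4C57, 0x4C74,
  0x4CB1, 0x5032, 0x50EA, 0x5426, 0x544E, 0x5499, 0x5840, 0x5855, 0x587F,
  0x5C59, 0x5C95, 0x5C96, 0x5C97, 0x5CF5, 0x5CF7, 0x5CF8, 0x6033, 0x6069,
  0x608C, 0x6092, 0x609A, 0x60A3, 0x60C5, 0x60F4, 0x60FA, 0x60FB, 0x6420,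
  0x6476, 0x649A, 0x64A3, 0x64B0, 0x64B9, 0x64E6, 0x6809, 0x6864, 0x6896,
  0x689C, 0x68A8, 0x68AB, 0x68AE, 0x68D9, 0x68FB, 0x6C19, 0x6C3E, 0x6C70,
  0x6C72, 0x6C8D, 0x6C94, 0x6C96, 0x6CAB, 0x7014, 0x703E, 0x7048, 0x7056,
  0x7073, 0x70A2, 0x70CD, 0x70DE, 0x70E7, 0x70EC, 0x741B, 0x7481, 0x748D,
  0x74E1, 0x74E2, 0x7831, 0x7832, 0x786C, 0x787B, 0x7888, 0x789F, 0x78A3,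
  0x78CA, 0x7C01, 0x7C04, 0x7C11, 0x7C50, 0x7C6D, 0x7CFA, 0x8000, 0x8049,
  0x8082, 0x8092, 0x80B0, 0x80E6, 0x8429, 0x8438, 0x8441, 0x8478, 0x8485,
  0x8489, 0x84A1, 0x84B1, 0x84FC, 0x8819, 0x881F, 0x8853, 0x8866, 0x88C6,
  0x8C00, 0x8C29, 0x8C2D, 0x8C7B, 0x8C8E, 0x8CFA, 0x9027, 0x9060, 0x9072,
  0x9084, 0x908D, 0x90B0, 0x90B2, 0x90C1, 0x90FD, 0x9494, 0x94BF, 0x94E9,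
  0x94F6, 0x9800, 0x9801, 0x9803, 0x9810, 0x985A, 0x989E, 0x98B8, 0x98D6,
  0x98E0, 0x98F0, 0x98F4, 0x98FE, 0x9C04, 0x9C20, 0x9C29, 0x9C35, 0x9C4F,
  0x9C8B, 0x9CF3, 0x9CF4, 0xA099, 0xA0D7, 0xA431, 0xA467, 0xA4B1, 0xA4B8,
  0xA4C3, 0xA4D1, 0xA4D9, 0xA820, 0xA85B, 0xA85C, 0xA866, 0xA888, 0xA88E,
  0xA896, 0xA8BB, 0xA8FA, 0xAC1F, 0xAC29, 0xAC3C, 0xAC61, 0xAC7F, 0xAC87,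
  0xACBC, 0xACCF, 0xACE4, 0xACFD, 0xB019, 0xB034, 0xB048, 0xB065, 0xB070,
  0xB09F, 0xB0CA, 0xB0EC, 0xB418, 0xB44B, 0xB48B, 0xB4F0, 0xB809, 0xB817,
  0xB841, 0xB844, 0xB853, 0xB863, 0xB878, 0xB88D, 0xB8C1, 0xB8C7, 0xB8E8,
  0xB8F6, 0xB8FF, 0xBC3B, 0xBC4C, 0xBC52, 0xBC54, 0xBC67, 0xBC92, 0xBC9F,
  0xBCA9, 0xBCEC, 0xC01A, 0xC063, 0xC084, 0xC0A5, 0xC0CC, 0xC0CE, 0xC0D0,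
  0xC0F2, 0xC42C, 0xC498, 0xC4B3, 0xC81E, 0xC82A, 0xC833, 0xC83C, 0xC869,
  0xC885, 0xC8B5, 0xC8BC, 0xC8BF, 0xC8D0, 0xC8E0, 0xC8F6, 0xCC08, 0xCC20,
  0xCC25, 0xCC29, 0xCC44, 0xCC78, 0xCC7E, 0xCCC7, 0xD003, 0xD023, 0xD025,
  0xD033, 0xD04B, 0xD081, 0xD0A6, 0xD0C5, 0xD0D2, 0xD0E1, 0xD461, 0xD49A,
  0xD4A3, 0xD4DC, 0xD4F4, 0xD800, 0xD81D, 0xD830, 0xD88F, 0xD896, 0xD89E,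
  0xD8BB, 0xD8CF, 0xD8D1, 0xDC0C, 0xDC2B, 0xDC37, 0xDC41, 0xDC86, 0xDCA4,
  0xDCA9, 0xDCD2, 0xDCF7, 0xE05F, 0xE066, 0xE0B5, 0xE0B9, 0xE0C7, 0xE0F5,
  0xE0F8, 0xE425, 0xE42B, 0xE48B, 0xE49A, 0xE4C6, 0xE4CE, 0xE4E0, 0xE4E4,
  0xE804, 0xE806, 0xE880, 0xE88D, 0xE8B2, 0xEC35, 0xEC85, 0xECAD, 0xF018,
  0xF079, 0xF098, 0xF099, 0xF0B0, 0xF0B1, 0xF0C1, 0xF0CB, 0xF0D1, 0xF0DB,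
  0xF0DC, 0xF0F6, 0xF40F, 0xF41B, 0xF431, 0xF437, 0xF45C, 0xF4D4, 0xF4F1,
  0xF4F5, 0xF803, 0xF81E, 0xF827, 0xF838, 0xF862, 0xF86F, 0xFC25, 0xFCA8,
  0xFCB6, 0xFCD8, 0xFCE9, 0xFCFC ]

def apple_long_codes : PySem.Set Int := PySem.Set.ofList apple_long_codes_raw

-- _hexval(c): ord(c) is the code point, i.e. Char.toNat (exact on all of Unicode)
def hexval (c : Char) : Int :=
  if 48 ≤ (c.toNat : Int) ∧ (c.toNat : Int) ≤ 57 then (c.toNat : Int) - 48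
  else if 65 ≤ (c.toNat : Int) ∧ (c.toNat : Int) ≤ 70 then (c.toNat : Int) - 55
  else -1

-- u[k] only evaluated under the preceding len guard, so the total pyGetD is exact
def is_likely_apple_device_alt (address : String) : Bool :=
  let u := (PySem.Str.upper address).toList
  if u.length < 3 ∨ PySem.List.pyGetD u 2 ' ' ≠ ':' then false
  else
    let h0 := hexval (PySem.List.pyGetD u 0 ' ')
    let h1 := hexval (PySem.List.pyGetD u 1 ' ')
    if h0 < 0 ∨ h1 < 0 then false
    else if h0 * 16 + h1 = 0xAC then true
    else if u.length < 6 ∨ PySem.List.pyGetD u 5 ' ' ≠ ':' then false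
    else
      let h3 := hexval (PySem.List.pyGetD u 3 ' ')
      let h4 := hexval (PySem.List.pyGetD u 4 ' ')
      if h3 < 0 ∨ h4 < 0 then false
      else PySem.Set.contains apple_long_codes ((h0 * 16 + h1) * 256 + h3 * 16 + h4)

-- ===== PRECONDITION & SPEC =====
def Spec_is_likely_apple_device (address : String) (out : Bool) : Prop := out = is_likely_apple_device_alt address
instance (address : String) (out : Bool) : Decidable (Spec_is_likely_apple_device address out) := by unfold Spec_is_likely_apple_device; infer_instance

-- ===== CLAIM =====
def Claim_equal_is_likely_apple_device : Prop := ∀ (address : String), Dom_is_likely_apple_device address → Spec_is_likely_apple_device address (is_likely_apple_device address)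

-- ===== LEMMAS AND PROOFS =====

-- the 373 six-character prefixes of A's list (everything after the head "AC:")
def longPrefixes : List String := apple_prefixes.tail

lemma split_prefixes : apple_prefixes = "AC:" :: longPrefixes := rfl

-- decoding a numeric code back to its canonical six-character prefix
def hexChars : List Char := ['0','1','2','3','4','5','6','7','8','9','A','B','C','D','E','F']

def dec1 (h : Int) : Char := hexChars.getD h.toNat ' '

def dec6 (n : Int) : List Char :=
  [dec1 (n / 4096 % 16), dec1 (n / 256 % 16), ':', dec1 (n / 16 % 16), dec1 (n % 16), ':']

set_option maxRecDepth 100000 in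
lemma codes_decode : apple_long_codes_raw.map dec6 = longPrefixes.map String.toList := by decide

set_option maxRecDepth 100000 in
lemma codes_bounds : ∀ n ∈ apple_long_codes_raw, 0 ≤ n ∧ n < 65536 := by decide

lemma char_eq_of_toNat {c d : Char} (h : c.toNat = d.toNat) : c = d :=
  Char.ext (UInt32.toNat_inj.mp h)

lemma hexval_lt (c : Char) : hexval c < 16 := by
  unfold hexval; split_ifs <;> omega

lemma dec1_toNat_lo : ∀ k : Nat, k < 10 → (dec1 (k : Int)).toNat = 48 + k := by decide

lemma dec1_toNat_hi : ∀ k : Nat, 10 ≤ k → k < 16 → (dec1 (k : Int)).toNat = 55 + k := by decide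

lemma dig (c : Char) (h : Int) (hl : 0 ≤ h) (hh : h < 16) :
    c = dec1 h ↔ 0 ≤ hexval c ∧ hexval c = h := by
  constructor
  · rintro rfl
    interval_cases h <;> decide
  · rintro ⟨hc, rfl⟩
    apply char_eq_of_toNat
    unfold hexval at hc ⊢
    split_ifs with h1 h2
    · have hk : ((c.toNat : Int) - 48).toNat < 10 := by omega
      have := dec1_toNat_lo ((c.toNat : Int) - 48).toNat hk
      rw [show (((c.toNat : Int) - 48).toNat : Int) = (c.toNat : Int) - 48 by omega] at this
      omega
    · have hk1 : 10 ≤ ((c.toNat : Int) - 55).toNat := by omega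
      have hk2 : ((c.toNat : Int) - 55).toNat < 16 := by omega
      have := dec1_toNat_hi ((c.toNat : Int) - 55).toNat hk1 hk2
      rw [show (((c.toNat : Int) - 55).toNat : Int) = (c.toNat : Int) - 55 by omega] at this
      omega
    · omega

lemma sw_take (t q : List Char) : PySem.Chars.startswith t q = decide (t.take q.length = q) := by
  by_cases h : q <+: t
  · have ht : t.take q.length = q := (List.prefix_iff_eq_take.mp h).symm
    simp [(PySem.Chars.startswith_iff t q).mpr h, ht]
  · have h2 : PySem.Chars.startswith t q = false := by
      rcases Bool.eq_false_or_eq_true (PySem.Chars.startswith t q) with hb | hb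
      · exact absurd ((PySem.Chars.startswith_iff t q).mp hb) h
      · exact hb
    have h3 : t.take q.length ≠ q := fun he => h (List.prefix_iff_eq_take.mpr he.symm)
    simp [h2, h3]

lemma take3_eq (t : List Char) :
    t.take 3 = ['A', 'C', ':'] ↔
      (3 ≤ t.length ∧ PySem.List.pyGetD t 2 ' ' = ':' ∧
        0 ≤ hexval (PySem.List.pyGetD t 0 ' ') ∧ 0 ≤ hexval (PySem.List.pyGetD t 1 ' ') ∧
        hexval (PySem.List.pyGetD t 0 ' ') * 16 + hexval (PySem.List.pyGetD t 1 ' ') = 172) := by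
  match t with
  | [] => simp [PySem.List.pyGetD]
  | [c0] => simp [PySem.List.pyGetD]
  | [c0, c1] => simp [PySem.List.pyGetD]
  | c0 :: c1 :: c2 :: r =>
    have e0 : PySem.List.pyGetD (c0 :: c1 :: c2 :: r) 0 ' ' = c0 := by
      simp [PySem.List.pyGetD_zero_cons]
    have e1 : PySem.List.pyGetD (c0 :: c1 :: c2 :: r) 1 ' ' = c1 := by
      rw [show (1 : Int) = ((1 : Nat) : Int) by rfl, PySem.List.pyGetD_natCast]; rfl
    have e2 : PySem.List.pyGetD (c0 :: c1 :: c2 :: r) 2 ' ' = c2 := by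
      rw [show (2 : Int) = ((2 : Nat) : Int) by rfl, PySem.List.pyGetD_natCast]; rfl
    have dA : c0 = dec1 10 ↔ 0 ≤ hexval c0 ∧ hexval c0 = 10 := dig c0 10 (by omega) (by omega)
    have dC : c1 = dec1 12 ↔ 0 ≤ hexval c1 ∧ hexval c1 = 12 := dig c1 12 (by omega) (by omega)
    have h0lt := hexval_lt c0
    have h1lt := hexval_lt c1
    rw [e0, e1, e2]
    simp only [List.take, List.cons.injEq, and_true, List.length_cons]
    rw [show ('A' : Char) = dec1 10 by decide, show ('C' : Char) = dec1 12 by decide]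
    rw [dA, dC]
    constructor
    · rintro ⟨⟨ha, hav⟩, ⟨hc, hcv⟩, hcol⟩
      exact ⟨by omega, hcol, ha, hc, by omega⟩
    · rintro ⟨-, hcol, ha, hc, hsum⟩
      exact ⟨⟨ha, by omega⟩, ⟨hc, by omega⟩, hcol⟩

lemma take6_eq (t : List Char) (n : Int) (h0n : 0 ≤ n) (hn : n < 65536) :
    t.take 6 = dec6 n ↔
      (6 ≤ t.length ∧ PySem.List.pyGetD t 2 ' ' = ':' ∧ PySem.List.pyGetD t 5 ' ' = ':' ∧
        0 ≤ hexval (PySem.List.pyGetD t 0 ' ') ∧ 0 ≤ hexval (PySem.List.pyGetD t 1 ' ') ∧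
        0 ≤ hexval (PySem.List.pyGetD t 3 ' ') ∧ 0 ≤ hexval (PySem.List.pyGetD t 4 ' ') ∧
        (hexval (PySem.List.pyGetD t 0 ' ') * 16 + hexval (PySem.List.pyGetD t 1 ' ')) * 256 +
          hexval (PySem.List.pyGetD t 3 ' ') * 16 + hexval (PySem.List.pyGetD t 4 ' ') = n) := by
  match t with
  | [] => simp [PySem.List.pyGetD, dec6]
  | [c0] => simp [PySem.List.pyGetD, dec6]
  | [c0, c1] => simp [PySem.List.pyGetD, dec6]
  | [c0, c1, c2] => simp [PySem.List.pyGetD, dec6]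
  | [c0, c1, c2, c3] => simp [PySem.List.pyGetD, dec6]
  | [c0, c1, c2, c3, c4] => simp [PySem.List.pyGetD, dec6]
  | c0 :: c1 :: c2 :: c3 :: c4 :: c5 :: r =>
    have e0 : PySem.List.pyGetD (c0 :: c1 :: c2 :: c3 :: c4 :: c5 :: r) 0 ' ' = c0 := by
      simp [PySem.List.pyGetD_zero_cons]
    have e1 : PySem.List.pyGetD (c0 :: c1 :: c2 :: c3 :: c4 :: c5 :: r) 1 ' ' = c1 := by
      rw [show (1 : Int) = ((1 : Nat) : Int) by rfl, PySem.List.pyGetD_natCast]; rfl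
    have e2 : PySem.List.pyGetD (c0 :: c1 :: c2 :: c3 :: c4 :: c5 :: r) 2 ' ' = c2 := by
      rw [show (2 : Int) = ((2 : Nat) : Int) by rfl, PySem.List.pyGetD_natCast]; rfl
    have e3 : PySem.List.pyGetD (c0 :: c1 :: c2 :: c3 :: c4 :: c5 :: r) 3 ' ' = c3 := by
      rw [show (3 : Int) = ((3 : Nat) : Int) by rfl, PySem.List.pyGetD_natCast]; rfl
    have e4 : PySem.List.pyGetD (c0 :: c1 :: c2 :: c3 :: c4 :: c5 :: r) 4 ' ' = c4 := by
      rw [show (4 : Int) = ((4 : Nat) : Int) by rfl, PySem.List.pyGetD_natCast]; rfl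
    have e5 : PySem.List.pyGetD (c0 :: c1 :: c2 :: c3 :: c4 :: c5 :: r) 5 ' ' = c5 := by
      rw [show (5 : Int) = ((5 : Nat) : Int) by rfl, PySem.List.pyGetD_natCast]; rfl
    have d0 : c0 = dec1 (n / 4096 % 16) ↔ 0 ≤ hexval c0 ∧ hexval c0 = n / 4096 % 16 :=
      dig c0 _ (by omega) (by omega)
    have d1 : c1 = dec1 (n / 256 % 16) ↔ 0 ≤ hexval c1 ∧ hexval c1 = n / 256 % 16 :=
      dig c1 _ (by omega) (by omega)
    have d3 : c3 = dec1 (n / 16 % 16) ↔ 0 ≤ hexval c3 ∧ hexval c3 = n / 16 % 16 :=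
      dig c3 _ (by omega) (by omega)
    have d4 : c4 = dec1 (n % 16) ↔ 0 ≤ hexval c4 ∧ hexval c4 = n % 16 :=
      dig c4 _ (by omega) (by omega)
    have l0 := hexval_lt c0
    have l1 := hexval_lt c1
    have l3 := hexval_lt c3
    have l4 := hexval_lt c4
    rw [e0, e1, e2, e3, e4, e5]
    simp only [dec6, List.take, List.cons.injEq, and_true, List.length_cons]
    rw [d0, d1, d3, d4]
    constructor
    · rintro ⟨⟨a0, v0⟩, ⟨a1, v1⟩, hc2, ⟨a3, v3⟩, ⟨a4, v4⟩, hc5⟩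
      exact ⟨by omega, hc2, hc5, a0, a1, a3, a4, by omega⟩
    · rintro ⟨-, hc2, hc5, a0, a1, a3, a4, hsum⟩
      exact ⟨⟨a0, by omega⟩, ⟨a1, by omega⟩, hc2, ⟨a3, by omega⟩, ⟨a4, by omega⟩, hc5⟩

lemma dec6_length (n : Int) : (dec6 n).length = 6 := by simp [dec6]

lemma any_decide_eq_contains (l : List Int) (x : Int) :
    (l.any fun n => decide (x = n)) = PySem.Set.contains (PySem.Set.ofList l) x := by
  have h1 : (l.any fun n => decide (x = n)) = decide (x ∈ l) := by
    induction l with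
    | nil => simp
    | cons a l ih => by_cases hxa : x = a <;> simp [hxa, ih]
  rw [h1]
  rcases Bool.eq_false_or_eq_true (PySem.Set.contains (PySem.Set.ofList l) x) with hb | hb <;> rw [hb]
  · have hx : x ∈ l := (PySem.Set.mem_ofList l x).mp ((PySem.Set.contains_iff (PySem.Set.ofList l) x).mp hb)
    simp [hx]
  · have hx : x ∉ l := fun hx => by
      have h2 := (PySem.Set.contains_iff (PySem.Set.ofList l) x).mpr ((PySem.Set.mem_ofList l x).mpr hx)
      rw [h2] at hb
      exact absurd hb (by simp)
    simp [hx]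

-- ===== VERDICT =====
theorem is_likely_apple_device_spec : Claim_equal_is_likely_apple_device := by
  intro address _
  unfold Spec_is_likely_apple_device is_likely_apple_device is_likely_apple_device_alt
  rw [split_prefixes]
  simp only [PySem.Str.startswith_eq, List.any_cons]
  generalize (PySem.Str.upper address).toList = t
  have hac : ("AC:" : String).toList = ['A', 'C', ':'] := by decide
  rw [sw_take t ("AC:".toList), hac]
  have hlong : (longPrefixes.any fun p => PySem.Chars.startswith t p.toList)
      = apple_long_codes_raw.any (fun n => decide (t.take 6 = dec6 n)) := by
    have h1 : (longPrefixes.any fun p => PySem.Chars.startswith t p.toList)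
        = (longPrefixes.map String.toList).any (fun q => PySem.Chars.startswith t q) := by
      rw [List.any_map]; rfl
    rw [h1, ← codes_decode, List.any_map]
    refine PySem.List.any_congr_mem (fun n hn => ?_)
    simp only [Function.comp_apply, sw_take t (dec6 n), dec6_length]
  rw [show (['A', 'C', ':'] : List Char).length = 3 from rfl, hlong]
  split_ifs with g1 g2 g3 g4 g5
  · -- no "XX:" shape at the front: every prefix fails
    simp only [Bool.or_eq_false_iff, decide_eq_false_iff_not, List.any_eq_false]
    constructor
    · rw [take3_eq]; rintro ⟨hl, hc, -⟩
      rcases g1 with g1 | g1 <;> [omega; exact g1 hc]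
    · intro n hn
      obtain ⟨hb0, hb1⟩ := codes_bounds n hn
      simp only [decide_eq_true_eq]
      rw [take6_eq t n hb0 hb1]; rintro ⟨hl, hc, -⟩
      rcases g1 with g1 | g1 <;> [omega; exact g1 hc]
  · -- a non-hex character in the first byte
    simp only [Bool.or_eq_false_iff, decide_eq_false_iff_not, List.any_eq_false]
    constructor
    · rw [take3_eq]; rintro ⟨-, -, h0, h1, -⟩
      rcases g2 with g2 | g2 <;> omega
    · intro n hn
      obtain ⟨hb0, hb1⟩ := codes_bounds n hn
      simp only [decide_eq_true_eq]
      rw [take6_eq t n hb0 hb1]; rintro ⟨-, -, -, h0, h1, -⟩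
      rcases g2 with g2 | g2 <;> omega
  · -- first byte is 0xAC: A's head prefix "AC:" matches
    obtain ⟨g1a, g1b⟩ := not_or.mp g1
    obtain ⟨g2a, g2b⟩ := not_or.mp g2
    have : t.take 3 = ['A', 'C', ':'] := by
      rw [take3_eq]
      exact ⟨by omega, not_not.mp g1b, by omega, by omega, by omega⟩
    simp [this]
  · -- no second "XX:" group and first byte ≠ 0xAC
    simp only [Bool.or_eq_false_iff, decide_eq_false_iff_not, List.any_eq_false]
    constructor
    · rw [take3_eq]; rintro ⟨-, -, -, -, hs⟩; exact g3 hs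
    · intro n hn
      obtain ⟨hb0, hb1⟩ := codes_bounds n hn
      simp only [decide_eq_true_eq]
      rw [take6_eq t n hb0 hb1]; rintro ⟨hl, -, hc5, -⟩
      rcases g4 with g4 | g4 <;> [omega; exact g4 hc5]
  · -- a non-hex character in the second byte
    simp only [Bool.or_eq_false_iff, decide_eq_false_iff_not, List.any_eq_false]
    constructor
    · rw [take3_eq]; rintro ⟨-, -, -, -, hs⟩; exact g3 hs
    · intro n hn
      obtain ⟨hb0, hb1⟩ := codes_bounds n hn
      simp only [decide_eq_true_eq]
      rw [take6_eq t n hb0 hb1]; rintro ⟨-, -, -, -, -, h3, h4, -⟩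
      rcases g5 with g5 | g5 <;> omega
  · -- both bytes decode: prefix match ⟺ the code is in the set
    obtain ⟨g1a, g1b⟩ := not_or.mp g1
    obtain ⟨g2a, g2b⟩ := not_or.mp g2
    obtain ⟨g4a, g4b⟩ := not_or.mp g4
    obtain ⟨g5a, g5b⟩ := not_or.mp g5
    have hleft : decide (t.take 3 = ['A', 'C', ':']) = false := by
      simp only [decide_eq_false_iff_not]
      rw [take3_eq]; rintro ⟨-, -, -, -, hs⟩; exact g3 hs
    have hcode : ∀ n ∈ apple_long_codes_raw,
        decide (t.take 6 = dec6 n)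
          = decide ((hexval (PySem.List.pyGetD t 0 ' ') * 16 + hexval (PySem.List.pyGetD t 1 ' ')) * 256 +
              hexval (PySem.List.pyGetD t 3 ' ') * 16 + hexval (PySem.List.pyGetD t 4 ' ') = n) := by
      intro n hn
      obtain ⟨hb0, hb1⟩ := codes_bounds n hn
      apply decide_eq_decide.mpr
      rw [take6_eq t n hb0 hb1]
      constructor
      · rintro ⟨-, -, -, -, -, -, -, hs⟩; exact hs
      · intro hs
        exact ⟨by omega, not_not.mp g1b, not_not.mp g4b, by omega, by omega, by omega, by omega, hs⟩
    rw [hleft, Bool.false_or, PySem.List.any_congr_mem hcode]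
    unfold apple_long_codes
    exact any_decide_eq_contains apple_long_codes_raw _
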